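-- pv_equiv track=rewrite | github.com/omkesh-munde/Airflow_GenAi_JD | log_watcher.py | extract_error_block
-- ===== SOURCE A (Python) =====
-- ERROR_KEYWORDS = ("ERROR", "Traceback", "Exception")
--
-- def extract_error_block(log_text: str) -> str | None:
--     """
--     Extract an error *block* from a log.
--
--     Heuristic (prototype):
--     - Find the earliest occurrence of any keyword (ERROR / Traceback / Exception)
--     - Return everything from that point to end-of-file
--     This tends to capture full tracebacks and multi-line error context.
--     """
--     if not log_text or not log_text.strip():
--         return None
--
--     earliest_idx: int | None = None
--     for kw in ERROR_KEYWORDS: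
--         idx = log_text.find(kw)
--         if idx != -1 and (earliest_idx is None or idx < earliest_idx):
--             earliest_idx = idx
--
--     if earliest_idx is None:
--         return None
--
--     return log_text[earliest_idx:].strip()
-- ===== SOURCE B (Python) =====
-- ERROR_KEYWORDS = ("ERROR", "Traceback", "Exception")
--
-- def extract_error_block(log_text):
--     if not log_text or not log_text.strip():
--         return None
--     for i in range(len(log_text)):
--         if log_text.startswith(ERROR_KEYWORDS, i):
--             return log_text[i:].strip()
--     return None
-- ===== Notes on version B (the rewrite author's own statement) =====
-- stated objective: alternative
-- what changed: A runs str.find once per keyword and tracks the minimum index; B makes a single left-to-right scan over positions and returns at the first position where any keyword starts (leftmost match of the alternation).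
import Mathlib
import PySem

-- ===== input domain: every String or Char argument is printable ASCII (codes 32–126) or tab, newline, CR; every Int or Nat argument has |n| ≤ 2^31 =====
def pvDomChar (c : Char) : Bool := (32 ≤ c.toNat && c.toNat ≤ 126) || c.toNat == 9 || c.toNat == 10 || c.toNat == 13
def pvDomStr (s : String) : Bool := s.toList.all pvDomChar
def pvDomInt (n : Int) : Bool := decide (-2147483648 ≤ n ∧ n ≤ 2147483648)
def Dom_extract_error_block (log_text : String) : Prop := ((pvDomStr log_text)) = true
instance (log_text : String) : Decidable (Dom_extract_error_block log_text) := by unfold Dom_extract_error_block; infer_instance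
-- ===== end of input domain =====

-- B replaces A's three find-and-track-minimum passes by one left-to-right scan that
-- returns at the first position where any keyword starts ('alternative'; not faster).

-- ===== PORT A =====
def ERROR_KEYWORDS : List String := ["ERROR", "Traceback", "Exception"]

def extract_error_block (log_text : String) : Option String :=
  if log_text = "" ∨ PySem.Str.strip log_text = "" then none
  else
    let earliest : Option Int := ERROR_KEYWORDS.foldl
      (fun e kw =>
        let idx := PySem.Str.find log_text kw
        if idx != -1 && (e.elim true fun j => idx < j) then some idx else e)
      none
    match earliest with
    | none => none
    | some i => some (PySem.Str.strip (PySem.Str.slice log_text (some i) none))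

-- ===== PORT B =====
def pvKeywords : List String := ["ERROR", "Traceback", "Exception"]

-- the 'for i in range(len(log_text)): if log_text.startswith(ERROR_KEYWORDS, i)' scan
def pvScan (cs : List Char) (pos : Nat) : Option Nat :=
  match cs with
  | [] => none
  | c :: rest =>
      if pvKeywords.any (fun kw => kw.toList.isPrefixOf (c :: rest)) then some pos
      else pvScan rest (pos + 1)

def extract_error_block_alt (log_text : String) : Option String :=
  if log_text = "" ∨ PySem.Str.strip log_text = "" then none
  else
    match pvScan log_text.toList 0 with
    | some i => some (PySem.Str.strip (PySem.Str.slice log_text (some (i : Int)) none))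
    | none => none

-- ===== PRECONDITION & SPEC =====
def Spec_extract_error_block (log_text : String) (out : Option String) : Prop := out = extract_error_block_alt log_text
instance (log_text : String) (out : Option String) : Decidable (Spec_extract_error_block log_text out) := by unfold Spec_extract_error_block; infer_instance

-- ===== CLAIM (what is proved, stated in full; the proofs are below) =====
def Claim_equal_extract_error_block : Prop := ∀ (log_text : String), Dom_extract_error_block log_text → Spec_extract_error_block log_text (extract_error_block log_text)

-- ===== LEMMAS AND PROOFS =====

-- "some keyword starts at position j of cs"
def pvHit (cs : List Char) (j : Nat) : Prop := ∃ kw ∈ pvKeywords, kw.toList <+: cs.drop j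

lemma pvScan_none (cs : List Char) (h : ∀ j, ¬ pvHit cs j) : ∀ p, pvScan cs p = none := by
  induction cs with
  | nil => intro p; rfl
  | cons c rest ih =>
      intro p
      have h0 : ¬ pvHit (c :: rest) 0 := h 0
      have hc : (pvKeywords.any fun kw => kw.toList.isPrefixOf (c :: rest)) = false := by
        simp only [List.any_eq_false]
        intro kw hkw
        simp only [List.isPrefixOf_iff_prefix]
        exact fun hp => h0 ⟨kw, hkw, by simpa using hp⟩
      simp only [pvScan, hc, Bool.false_eq_true, if_false]
      exact ih (fun j => by simpa [pvHit] using h (j + 1)) (p + 1)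

lemma pvScan_some (cs : List Char) : ∀ p i, pvHit cs i → (∀ j < i, ¬ pvHit cs j) →
    pvScan cs p = some (p + i) := by
  induction cs with
  | nil =>
      intro p i hi _
      obtain ⟨kw, hkw, hp⟩ := hi
      simp only [List.drop_nil, List.prefix_nil] at hp
      fin_cases hkw <;> simp_all
  | cons c rest ih =>
      intro p i hi hj
      cases i with
      | zero =>
          have hc : (pvKeywords.any fun kw => kw.toList.isPrefixOf (c :: rest)) = true := by
            obtain ⟨kw, hkw, hp⟩ := hi
            exact List.any_eq_true.2 ⟨kw, hkw, List.isPrefixOf_iff_prefix.2 (by simpa using hp)⟩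
          simp [pvScan, hc]
      | succ i' =>
          have h0 : ¬ pvHit (c :: rest) 0 := hj 0 (Nat.succ_pos _)
          have hc : (pvKeywords.any fun kw => kw.toList.isPrefixOf (c :: rest)) = false := by
            simp only [List.any_eq_false]
            intro kw hkw
            simp only [List.isPrefixOf_iff_prefix]
            exact fun hp => h0 ⟨kw, hkw, by simpa using hp⟩
          simp only [pvScan, hc, Bool.false_eq_true, if_false]
          have := ih (p + 1) i' (by simpa [pvHit] using hi)
            (fun j hlt => by simpa [pvHit] using hj (j + 1) (by omega))
          rw [this]; congr 1; omega

-- a find value of -1 means the keyword starts nowhere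
lemma pv_no_hit_of_find_neg (cs : List Char) (kw : String)
    (h : PySem.Chars.find cs kw.toList = -1) : ∀ j, ¬ kw.toList <+: cs.drop j := by
  intro j hp
  have : PySem.Chars.isIn kw.toList cs = true :=
    (PySem.Chars.exists_prefix_drop_iff_isIn _ _).1 ⟨j, hp⟩
  exact ((PySem.Chars.find_eq_neg_one_iff _ _).1 h) ((PySem.Chars.isIn_iff_infix _ _).1 this)

lemma pvScan_eq_of_min (s : String) (m : Int) (h0 : 0 ≤ m)
    (hex : ∃ kw ∈ pvKeywords, PySem.Chars.find s.toList kw.toList = m)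
    (hmin : ∀ kw ∈ pvKeywords, PySem.Chars.find s.toList kw.toList = -1 ∨
              m ≤ PySem.Chars.find s.toList kw.toList) :
    pvScan s.toList 0 = some m.toNat := by
  obtain ⟨kw0, hkw0, hf0⟩ := hex
  have hspec := PySem.Chars.find_spec (s := s.toList) (sub := kw0.toList) (by omega)
  rw [hf0] at hspec
  have hhit : pvHit s.toList m.toNat := ⟨kw0, hkw0, hspec.1⟩
  have hno : ∀ j < m.toNat, ¬ pvHit s.toList j := by
    intro j hj ⟨kw, hkw, hp⟩
    rcases hmin kw hkw with hneg | hle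
    · exact pv_no_hit_of_find_neg _ _ hneg j hp
    · have hfpos : 0 ≤ PySem.Chars.find s.toList kw.toList := by omega
      have hspec2 := PySem.Chars.find_spec (s := s.toList) (sub := kw.toList) hfpos
      exact hspec2.2 j (by omega) hp
  simpa using pvScan_some s.toList 0 m.toNat hhit hno

lemma pvScan_eq_none_of_all (s : String)
    (h : ∀ kw ∈ pvKeywords, PySem.Chars.find s.toList kw.toList = -1) :
    pvScan s.toList 0 = none := by
  apply pvScan_none
  intro j ⟨kw, hkw, hp⟩
  exact pv_no_hit_of_find_neg _ _ (h kw hkw) j hp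

-- ===== VERDICT (by name: the statement is the Claim_ definition above) =====
theorem extract_error_block_spec : Claim_equal_extract_error_block := by
  intro s _
  unfold Spec_extract_error_block extract_error_block extract_error_block_alt
  by_cases hg : s = "" ∨ PySem.Str.strip s = ""
  · simp [hg]
  · simp only [hg, if_false]
    set f1 := PySem.Chars.find s.toList "ERROR".toList with hf1
    set f2 := PySem.Chars.find s.toList "Traceback".toList with hf2
    set f3 := PySem.Chars.find s.toList "Exception".toList with hf3
    have hb1 : -1 ≤ f1 := PySem.Chars.neg_one_le_find _ _
    have hb2 : -1 ≤ f2 := PySem.Chars.neg_one_le_find _ _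
    have hb3 : -1 ≤ f3 := PySem.Chars.neg_one_le_find _ _
    have leaf : ∀ m : Int, 0 ≤ m → (∃ kw ∈ pvKeywords, PySem.Chars.find s.toList kw.toList = m) →
        (∀ kw ∈ pvKeywords, PySem.Chars.find s.toList kw.toList = -1 ∨
          m ≤ PySem.Chars.find s.toList kw.toList) →
        some m = (pvScan s.toList 0).map (fun n => (n : Int)) := by
      intro m h0 hex hmin
      rw [pvScan_eq_of_min s m h0 hex hmin]
      simp [Int.toNat_of_nonneg h0]
    have hfold : ERROR_KEYWORDS.foldl
        (fun e kw =>
          let idx := PySem.Str.find s kw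
          if idx != -1 && (e.elim true fun j => idx < j) then some idx else e)
        none = (pvScan s.toList 0).map (fun n => (n : Int)) := by
      simp only [ERROR_KEYWORDS, List.foldl, PySem.Str.find_eq, ← hf1, ← hf2, ← hf3]
      have hmem : ∀ P : String → Prop, (∀ kw ∈ pvKeywords, P kw) ↔
          (P "ERROR" ∧ P "Traceback" ∧ P "Exception") := by
        intro P
        constructor
        · intro h; exact ⟨h _ (by simp [pvKeywords]), h _ (by simp [pvKeywords]), h _ (by simp [pvKeywords])⟩
        · rintro ⟨pa, pb, pc⟩ kw hkw
          simp only [pvKeywords, List.mem_cons, List.not_mem_nil, or_false] at hkw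
          rcases hkw with rfl | rfl | rfl <;> assumption
      have hminP := fun m => (hmem (fun kw => PySem.Chars.find s.toList kw.toList = -1 ∨
          m ≤ PySem.Chars.find s.toList kw.toList)).2
      have hexE : ∀ m, f1 = m → ∃ kw ∈ pvKeywords, PySem.Chars.find s.toList kw.toList = m := by
        rintro m rfl; exact ⟨"ERROR", by simp [pvKeywords], hf1.symm⟩
      have hexT : ∀ m, f2 = m → ∃ kw ∈ pvKeywords, PySem.Chars.find s.toList kw.toList = m := by
        rintro m rfl; exact ⟨"Traceback", by simp [pvKeywords], hf2.symm⟩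
      have hexX : ∀ m, f3 = m → ∃ kw ∈ pvKeywords, PySem.Chars.find s.toList kw.toList = m := by
        rintro m rfl; exact ⟨"Exception", by simp [pvKeywords], hf3.symm⟩
      rcases eq_or_ne f1 (-1) with h1 | h1 <;> rcases eq_or_ne f2 (-1) with h2 | h2 <;>
        rcases eq_or_ne f3 (-1) with h3 | h3
      · rw [pvScan_eq_none_of_all s ((hmem _).2 ⟨by rw [← hf1]; exact h1,
          by rw [← hf2]; exact h2, by rw [← hf3]; exact h3⟩)]
        simp [h1, h2, h3]
      ·
        simp [Option.elim, h1, h2, h3]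
        rw [pvScan_eq_of_min s f3 (by omega) (hexX f3 rfl) (hminP f3
          ⟨by rw [← hf1]; omega, by rw [← hf2]; omega, by rw [← hf3]; omega⟩)]
        simp
        omega
      ·
        simp [Option.elim, h1, h2, h3]
        rw [pvScan_eq_of_min s f2 (by omega) (hexT f2 rfl) (hminP f2
          ⟨by rw [← hf1]; omega, by rw [← hf2]; omega, by rw [← hf3]; omega⟩)]
        simp
        omega
      · rcases Int.lt_or_le f3 f2 with hc | hc
        ·
          simp [Option.elim, h1, h2, h3, hc]
          rw [pvScan_eq_of_min s f3 (by omega) (hexX f3 rfl) (hminP f3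
            ⟨by rw [← hf1]; omega, by rw [← hf2]; omega, by rw [← hf3]; omega⟩)]
          simp
          omega
        ·
          simp [Option.elim, h1, h2, not_lt.mpr hc]
          rw [pvScan_eq_of_min s f2 (by omega) (hexT f2 rfl) (hminP f2
            ⟨by rw [← hf1]; omega, by rw [← hf2]; omega, by rw [← hf3]; omega⟩)]
          simp
          omega
      ·
        simp [Option.elim, h1, h2, h3]
        rw [pvScan_eq_of_min s f1 (by omega) (hexE f1 rfl) (hminP f1
          ⟨by rw [← hf1]; omega, by rw [← hf2]; omega, by rw [← hf3]; omega⟩)]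
        simp
        omega
      · rcases Int.lt_or_le f3 f1 with hc | hc
        ·
          simp [Option.elim, h1, h2, h3, hc]
          rw [pvScan_eq_of_min s f3 (by omega) (hexX f3 rfl) (hminP f3
            ⟨by rw [← hf1]; omega, by rw [← hf2]; omega, by rw [← hf3]; omega⟩)]
          simp
          omega
        ·
          simp [Option.elim, h1, h2, not_lt.mpr hc]
          rw [pvScan_eq_of_min s f1 (by omega) (hexE f1 rfl) (hminP f1
            ⟨by rw [← hf1]; omega, by rw [← hf2]; omega, by rw [← hf3]; omega⟩)]
          simp
          omega
      · rcases Int.lt_or_le f2 f1 with hc | hc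
        ·
          simp [Option.elim, h1, h2, h3, hc]
          rw [pvScan_eq_of_min s f2 (by omega) (hexT f2 rfl) (hminP f2
            ⟨by rw [← hf1]; omega, by rw [← hf2]; omega, by rw [← hf3]; omega⟩)]
          simp
          omega
        ·
          simp [Option.elim, h1, h3, not_lt.mpr hc]
          rw [pvScan_eq_of_min s f1 (by omega) (hexE f1 rfl) (hminP f1
            ⟨by rw [← hf1]; omega, by rw [← hf2]; omega, by rw [← hf3]; omega⟩)]
          simp
          omega
      · rcases Int.lt_or_le f2 f1 with hc | hc
        · rcases Int.lt_or_le f3 f2 with hd | hd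
          ·
            simp [Option.elim, h1, h2, h3, hc, hd]
            rw [pvScan_eq_of_min s f3 (by omega) (hexX f3 rfl) (hminP f3
              ⟨by rw [← hf1]; omega, by rw [← hf2]; omega, by rw [← hf3]; omega⟩)]
            simp
            omega
          ·
            simp [Option.elim, h1, h2, hc, not_lt.mpr hd]
            rw [pvScan_eq_of_min s f2 (by omega) (hexT f2 rfl) (hminP f2
              ⟨by rw [← hf1]; omega, by rw [← hf2]; omega, by rw [← hf3]; omega⟩)]
            simp
            omega
        · rcases Int.lt_or_le f3 f1 with hd | hd
          ·
            simp [Option.elim, h1, h3, not_lt.mpr hc, hd]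
            rw [pvScan_eq_of_min s f3 (by omega) (hexX f3 rfl) (hminP f3
              ⟨by rw [← hf1]; omega, by rw [← hf2]; omega, by rw [← hf3]; omega⟩)]
            simp
            omega
          ·
            simp [Option.elim, h1, not_lt.mpr hc, not_lt.mpr hd]
            rw [pvScan_eq_of_min s f1 (by omega) (hexE f1 rfl) (hminP f1
              ⟨by rw [← hf1]; omega, by rw [← hf2]; omega, by rw [← hf3]; omega⟩)]
            simp
            omega
    -- both sides now match on the same scan result
    rw [hfold]
    cases hsc : pvScan s.toList 0 with
    | none => rfl
    | some i => simp
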